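-- pv_equiv track=rewrite | github.com/MulBang/metasejong-project | metasejong-chatbot/app/rag_min.py | _pick_one_alternative
-- ===== SOURCE A (Python) =====
-- from typing import Optional, Tuple, List, Dict, Iterable
--
-- def _pick_one_alternative(menu_rows: List[Dict]) -> Optional[Dict]:
--     if len(menu_rows) < 2:
--         return None
--     top = menu_rows[0]
--     tb, tr = top["building_name"], top["restaurant_name"]
--     for r in menu_rows[1:]:
--         if r["building_name"] == tb and r["restaurant_name"] != tr:
--             return r
--     for r in menu_rows[1:]:
--         if r["building_name"] == tb and r["restaurant_name"] == tr:
--             return r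
--     return menu_rows[1]
-- ===== SOURCE B (Python) =====
-- def _pick_one_alternative(menu_rows):
--     if len(menu_rows) < 2:
--         return None
--     top = menu_rows[0]
--     tb, tr = top["building_name"], top["restaurant_name"]
--     same = None
--     for r in menu_rows[1:]:
--         if r["building_name"] == tb:
--             if r["restaurant_name"] != tr:
--                 return r
--             if same is None:
--                 same = r
--     return same if same is not None else menu_rows[1]
-- ===== Notes on version B (the rewrite author's own statement) =====
-- stated objective: simpler
-- what changed: Single pass over menu_rows[1:] that returns the first different-restaurant match immediately and remembers the first same-restaurant match in an accumulator, instead of A's two sequential scans of the tail.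
import Mathlib
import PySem

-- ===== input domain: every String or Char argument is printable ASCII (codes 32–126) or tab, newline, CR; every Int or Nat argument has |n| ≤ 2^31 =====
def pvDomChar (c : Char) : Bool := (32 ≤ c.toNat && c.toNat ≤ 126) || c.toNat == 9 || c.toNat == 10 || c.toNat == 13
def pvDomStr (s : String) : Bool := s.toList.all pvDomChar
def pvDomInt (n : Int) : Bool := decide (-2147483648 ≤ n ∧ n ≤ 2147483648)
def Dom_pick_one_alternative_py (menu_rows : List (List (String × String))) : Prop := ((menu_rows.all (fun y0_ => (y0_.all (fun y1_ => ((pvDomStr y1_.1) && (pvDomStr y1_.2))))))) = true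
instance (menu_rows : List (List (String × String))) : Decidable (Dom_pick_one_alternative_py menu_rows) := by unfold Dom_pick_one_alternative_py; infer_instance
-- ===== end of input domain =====

-- B replaces A's two sequential scans of the tail by one pass that early-returns the first
-- different-restaurant match and accumulates the first same-restaurant match (objective: simpler).

-- ===== PORT A =====
-- r[k]: first-match association-list lookup; Pre_ guarantees the key is present, so the "" default is never used
def pvGetA (r : List (String × String)) (k : String) : String :=
  ((r.find? (fun kv => kv.1 == k)).map Prod.snd).getD ""

def pick_one_alternative_py (menu_rows : List (List (String × String))) : Option (List (String × String)) :=
  if menu_rows.length < 2 then none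
  else
    match menu_rows with
    | [] => none
    | top :: rest =>
      let tb := pvGetA top "building_name"
      let tr := pvGetA top "restaurant_name"
      -- first for-loop with early return
      match rest.find? (fun r => pvGetA r "building_name" == tb && !(pvGetA r "restaurant_name" == tr)) with
      | some r => some r
      | none =>
        -- second for-loop with early return
        match rest.find? (fun r => pvGetA r "building_name" == tb && pvGetA r "restaurant_name" == tr) with
        | some r => some r
        | none => rest.head?   -- menu_rows[1], exists since length ≥ 2

-- ===== PORT B =====
def pvGetB (r : List (String × String)) (k : String) : String :=
  ((r.find? (fun kv => kv.1 == k)).map Prod.snd).getD ""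

-- the single loop: early return on a different-restaurant match, else carry `same`
def pvAltLoop (tb tr : String) (same : Option (List (String × String))) :
    List (List (String × String)) → Option (List (String × String))
  | [] => same
  | r :: rest =>
    if pvGetB r "building_name" == tb then
      if !(pvGetB r "restaurant_name" == tr) then some r
      else pvAltLoop tb tr (if same.isNone then some r else same) rest
    else pvAltLoop tb tr same rest

def pick_one_alternative_py_alt (menu_rows : List (List (String × String))) : Option (List (String × String)) :=
  if menu_rows.length < 2 then none
  else
    match menu_rows with
    | [] => none
    | top :: rest =>
      let tb := pvGetB top "building_name"
      let tr := pvGetB top "restaurant_name"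
      match pvAltLoop tb tr none rest with
      | some r => some r
      | none => rest.head?

-- ===== PRECONDITION & SPEC =====
-- Pre_ excludes (conservatively) inputs of length ≥ 2 where some row lacks "building_name" or a
-- row carrying the top row's building lacks "restaurant_name": there both Pythons generally raise
-- KeyError; on the few such inputs A still returns via an early match, B returns the same value.
def Pre_pick_one_alternative_py (menu_rows : List (List (String × String))) : Prop :=
  menu_rows.length < 2 ∨
    (∀ r ∈ menu_rows, (r.find? (fun kv => kv.1 == "building_name")).isSome ∧
      (pvGetA r "building_name" = pvGetA menu_rows.head! "building_name" →
        (r.find? (fun kv => kv.1 == "restaurant_name")).isSome))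
instance (menu_rows : List (List (String × String))) : Decidable (Pre_pick_one_alternative_py menu_rows) := by
  unfold Pre_pick_one_alternative_py; infer_instance

def pvWitness_pick_one_alternative_py : (List (List (String × String))) :=
  [[("building_name", "A"), ("restaurant_name", "r1")],
   [("building_name", "A"), ("restaurant_name", "r2")]]

def Spec_pick_one_alternative_py (menu_rows : List (List (String × String))) (out : Option (List (String × String))) : Prop := out = pick_one_alternative_py_alt menu_rows
instance (menu_rows : List (List (String × String))) (out : Option (List (String × String))) : Decidable (Spec_pick_one_alternative_py menu_rows out) := by unfold Spec_pick_one_alternative_py; infer_instance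

-- ===== CLAIM (what is proved, stated in full; the proofs are below) =====
def Claim_equal_pick_one_alternative_py : Prop := ∀ (menu_rows : List (List (String × String))), Dom_pick_one_alternative_py menu_rows → Pre_pick_one_alternative_py menu_rows → Spec_pick_one_alternative_py menu_rows (pick_one_alternative_py menu_rows)

-- ===== LEMMAS AND PROOFS =====

-- the single loop equals: first diff-match, else the carried `same`, else first same-match
theorem pvAltLoop_eq (tb tr : String) (rest : List (List (String × String)))
    (same : Option (List (String × String))) :
    pvAltLoop tb tr same rest =
      (rest.find? (fun r => pvGetB r "building_name" == tb && !(pvGetB r "restaurant_name" == tr))).or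
        (same.or (rest.find? (fun r => pvGetB r "building_name" == tb && pvGetB r "restaurant_name" == tr))) := by
  induction rest generalizing same with
  | nil => simp [pvAltLoop]
  | cons r rest ih =>
    by_cases hb : (pvGetB r "building_name" == tb) = true
    · by_cases hr : (pvGetB r "restaurant_name" == tr) = true
      · have hsame : (if same.isNone then some r else same) = same.or (some r) := by
          cases same <;> rfl
        rw [show pvAltLoop tb tr same (r :: rest) =
              pvAltLoop tb tr (if same.isNone then some r else same) rest by
            simp [pvAltLoop, hb, hr]]
        rw [List.find?_cons_of_neg (by simp [hb, hr]),
            List.find?_cons_of_pos (by simp [hb, hr]),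
            ih, hsame, Option.or_assoc, Option.some_or]
      · rw [show pvAltLoop tb tr same (r :: rest) = some r by simp [pvAltLoop, hb, hr]]
        rw [List.find?_cons_of_pos (by simp [hb, hr]), Option.some_or]
    · rw [show pvAltLoop tb tr same (r :: rest) = pvAltLoop tb tr same rest by
          simp [pvAltLoop, hb]]
      rw [List.find?_cons_of_neg (by simp [hb]),
          List.find?_cons_of_neg (by simp [hb]), ih]

-- ===== VERDICT (by name: the statement is the Claim_ definition above) =====
theorem pick_one_alternative_py_spec : Claim_equal_pick_one_alternative_py := by
  intro menu_rows _ _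
  unfold Spec_pick_one_alternative_py pick_one_alternative_py pick_one_alternative_py_alt
  by_cases hlen : menu_rows.length < 2
  · simp [hlen]
  · cases menu_rows with
    | nil => simp at hlen
    | cons top rest =>
      simp only [hlen, if_false]
      rw [pvAltLoop_eq]
      simp only [Option.none_or, pvGetA, pvGetB]
      cases rest.find? (fun r =>
          ((r.find? (fun kv => kv.1 == "building_name")).map Prod.snd).getD "" ==
            ((top.find? (fun kv => kv.1 == "building_name")).map Prod.snd).getD "" &&
          !(((r.find? (fun kv => kv.1 == "restaurant_name")).map Prod.snd).getD "" ==
            ((top.find? (fun kv => kv.1 == "restaurant_name")).map Prod.snd).getD "")) with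
      | some r => rfl
      | none =>
        cases rest.find? (fun r =>
            ((r.find? (fun kv => kv.1 == "building_name")).map Prod.snd).getD "" ==
              ((top.find? (fun kv => kv.1 == "building_name")).map Prod.snd).getD "" &&
            ((r.find? (fun kv => kv.1 == "restaurant_name")).map Prod.snd).getD "" ==
              ((top.find? (fun kv => kv.1 == "restaurant_name")).map Prod.snd).getD "") <;> rfl
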